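-- pv_equiv track=rewrite | github.com/RustyRipper/ai-code-generation | watermark-init/water_mark.py | extract_watermark
-- ===== SOURCE A (Python) =====
-- def extract_watermark(code):
--     lines = code.splitlines()
--
--     binary_pattern = []
--     for i in range(1, len(lines), 2):
--         if lines[i].endswith(" ") or lines[i].endswith("\t"):
--             last_char = lines[i][-1]
--             binary_pattern.append('1' if last_char == '\t' else '0')
--
--     watermark_text = ''
--     for i in range(0, len(binary_pattern), 8):
--         byte = ''.join(binary_pattern[i:i + 8])
--         if len(byte) == 8:
--             watermark_text += chr(int(byte, 2))
--
--     return watermark_text if watermark_text else "Brak znaku wodnego"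
-- ===== SOURCE B (Python) =====
-- def extract_watermark(code):
--     out = []
--     cur = 0
--     n = 0
--     odd = False
--     for line in code.splitlines():
--         if odd and line and line[-1] in " \t":
--             cur = cur * 2 + (1 if line[-1] == "\t" else 0)
--             n += 1
--             if n == 8:
--                 out.append(chr(cur))
--                 cur = 0
--                 n = 0
--         odd = not odd
--     return ''.join(out) if out else "Brak znaku wodnego"
-- ===== Notes on version B (the rewrite author's own statement) =====
-- stated objective: alternative
-- what changed: Fused A's two passes (first collect a list of bit characters from the odd-indexed lines, then re-scan that list in slices of eight parsed as base-2 ints) into one streaming loop over the lines that keeps an integer shift-accumulator and a bit count, emitting a character as soon as eight bits are gathered; no intermediate bit list is built.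
import Mathlib
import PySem

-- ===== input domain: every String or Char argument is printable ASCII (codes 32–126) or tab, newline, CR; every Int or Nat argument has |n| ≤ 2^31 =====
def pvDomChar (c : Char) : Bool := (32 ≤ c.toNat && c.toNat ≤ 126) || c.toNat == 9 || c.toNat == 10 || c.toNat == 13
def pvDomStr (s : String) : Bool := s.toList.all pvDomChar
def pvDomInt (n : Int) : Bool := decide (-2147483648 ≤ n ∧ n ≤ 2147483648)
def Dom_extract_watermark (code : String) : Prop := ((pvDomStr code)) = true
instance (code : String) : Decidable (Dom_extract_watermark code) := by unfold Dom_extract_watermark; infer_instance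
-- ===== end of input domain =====

-- B fuses A's two passes (collect '0'/'1' bit list, then re-scan in 8-slices) into one
-- streaming loop over the lines with an integer shift-accumulator; objective: alternative.

-- ===== PORT A =====
-- int(byte, 2): exact on the '0'/'1' digit strings A builds
def pvParseBin (s : List Char) : Nat :=
  s.foldl (fun a c => a * 2 + (if c = '1' then 1 else 0)) 0

def extract_watermark (code : String) : String :=
  let lines := PySem.Str.splitlines code
  let binary_pattern :=
    (PySem.List.pyRange 1 (lines.length : Int) 2).foldl
      (fun acc i =>
        let line := PySem.List.pyGetD lines i ""
        if PySem.Str.endswith line " " || PySem.Str.endswith line "\t" then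
          acc ++ [if PySem.Str.pyGet? line (-1) = some '\t' then '1' else '0']
        else acc) ([] : List Char)
  let watermark_text :=
    (PySem.List.pyRange 0 (binary_pattern.length : Int) 8).foldl
      (fun acc i =>
        let byte := PySem.List.slice binary_pattern (some i) (some (i + 8))
        if byte.length = 8 then acc ++ [Char.ofNat (pvParseBin byte)] else acc)
      ([] : List Char)
  if watermark_text = [] then "Brak znaku wodnego" else String.ofList watermark_text

-- ===== PORT B =====
def pvStepLine (st : List Char × Nat × Nat × Bool) (line : String) :
    List Char × Nat × Nat × Bool :=
  match st with
  | (out, cur, n, odd) =>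
    if odd then
      match line.toList.getLast? with
      | some c =>
        if c = ' ' ∨ c = '\t' then
          let cur' := cur * 2 + (if c = '\t' then 1 else 0)
          if n + 1 = 8 then (out ++ [Char.ofNat cur'], 0, 0, false)
          else (out, cur', n + 1, false)
        else (out, cur, n, false)
      | none => (out, cur, n, false)
    else (out, cur, n, true)

def extract_watermark_alt (code : String) : String :=
  let st := (PySem.Str.splitlines code).foldl pvStepLine ([], 0, 0, false)
  if st.1 = [] then "Brak znaku wodnego" else String.ofList st.1

-- ===== PRECONDITION & SPEC =====
def Spec_extract_watermark (code : String) (out : String) : Prop := out = extract_watermark_alt code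
instance (code : String) (out : String) : Decidable (Spec_extract_watermark code out) := by unfold Spec_extract_watermark; infer_instance

-- ===== CLAIM (what is proved, stated in full; the proofs are below) =====
def Claim_equal_extract_watermark : Prop := ∀ (code : String), Dom_extract_watermark code → Spec_extract_watermark code (extract_watermark code)

-- ===== LEMMAS AND PROOFS =====

-- the bit contributed by one qualifying line
def pvBitOf (l : String) : List Char :=
  match l.toList.getLast? with
  | some c => if c = '\t' then ['1'] else if c = ' ' then ['0'] else []
  | none => []

-- bits of the lines at indices s, s+2, s+4, …
def pvBits : List String → Nat → List Char
  | [], _ => []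
  | l :: ls, 0 => pvBitOf l ++ pvBits ls 1
  | _ :: ls, s + 1 => pvBits ls s

-- bit-by-bit chunking of a bit list into bytes (partial byte state cur/n)
def pvChunks : Nat → Nat → List Char → List Char
  | _, _, [] => []
  | cur, n, c :: bs =>
    let cur' := cur * 2 + (if c = '1' then 1 else 0)
    if n + 1 = 8 then Char.ofNat cur' :: pvChunks 0 0 bs else pvChunks cur' (n + 1) bs

-- B's accumulator restricted to the bit stream
def pvAcc8 : List Char × Nat × Nat → List Char → List Char × Nat × Nat
  | st, [] => st
  | (out, cur, n), c :: bs =>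
    let cur' := cur * 2 + (if c = '1' then 1 else 0)
    if n + 1 = 8 then pvAcc8 (out ++ [Char.ofNat cur'], 0, 0) bs
    else pvAcc8 (out, cur', n + 1) bs

theorem pvRange_nil (a b s : Int) (hs : 0 < s) (hab : b ≤ a) :
    PySem.List.pyRange a b s = [] := by
  rw [PySem.List.pyRange_of_pos _ _ hs, if_neg (by omega)]
  simp

theorem pvRange_shift (a b s t : Int) :
    PySem.List.pyRange (a + t) (b + t) s = (PySem.List.pyRange a b s).map (· + t) := by
  unfold PySem.List.pyRange
  by_cases hs : s = 0
  · simp [hs]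
  · rw [if_neg hs, if_neg hs]
    have h1 : b + t - (a + t) = b - a := by ring
    have h2 : a + t - (b + t) = a - b := by ring
    have h3 : a + t < b + t ↔ a < b := by omega
    have h4 : b + t < a + t ↔ b < a := by omega
    simp only [h1, h2, h3, h4, List.map_map]
    congr 1
    funext k
    simp only [Function.comp]
    ring

theorem pvRange_cons (a b s : Int) (hs : 0 < s) (hab : a < b) :
    PySem.List.pyRange a b s = a :: PySem.List.pyRange (a + s) b s := by
  rw [PySem.List.pyRange_of_pos _ _ hs, PySem.List.pyRange_of_pos _ _ hs, if_pos hab]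
  by_cases h2 : a + s < b
  · rw [if_pos h2]
    have hc : ((b - a + s - 1) / s).toNat = ((b - (a + s) + s - 1) / s).toNat + 1 := by
      have he : b - a + s - 1 = (b - (a + s) + s - 1) + 1 * s := by ring
      rw [he, Int.add_mul_ediv_right _ _ (by omega)]
      have hnn : 0 ≤ (b - (a + s) + s - 1) / s := Int.ediv_nonneg (by omega) (by omega)
      omega
    rw [hc, List.range_succ_eq_map, List.map_cons, List.map_map]
    congr 1
    · simp
    · congr 1
      funext k
      simp only [Function.comp]
      push_cast
      ring
  · rw [if_neg h2]
    have hc : ((b - a + s - 1) / s).toNat = 1 := by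
      have he : b - a + s - 1 = (b - a - 1) + 1 * s := by ring
      rw [he, Int.add_mul_ediv_right _ _ (by omega)]
      have h0 : (b - a - 1) / s = 0 := Int.ediv_eq_zero_of_lt (by omega) (by omega)
      omega
    rw [hc]
    simp

-- one line of A's first loop contributes exactly pvBitOf
theorem pvBitA (l : String) (acc : List Char) :
    (if PySem.Str.endswith l " " || PySem.Str.endswith l "\t" then
      acc ++ [if PySem.Str.pyGet? l (-1) = some '\t' then '1' else '0']
    else acc) = acc ++ pvBitOf l := by
  have hs : ∀ c : Char,
      PySem.Chars.endswith l.toList [c] = true ↔ l.toList.getLast? = some c := by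
    intro c
    rw [PySem.Chars.endswith_iff]
    constructor
    · rintro ⟨t, ht⟩
      rw [← ht]
      simp [List.getLast?_append]
    · intro h
      obtain ⟨ys, hys⟩ := List.getLast?_eq_some_iff.mp h
      exact ⟨ys, hys.symm⟩
  cases hlast : l.toList.getLast? with
  | none =>
    have e1 : PySem.Chars.endswith l.toList [' '] = false := by
      rw [← Bool.not_eq_true, hs, hlast]
      simp
    have e2 : PySem.Chars.endswith l.toList ['\t'] = false := by
      rw [← Bool.not_eq_true, hs, hlast]
      simp
    simp [pvBitOf, hlast, e1, e2]
  | some c =>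
    by_cases hct : c = '\t'
    · subst hct
      have e2 : PySem.Chars.endswith l.toList ['\t'] = true := (hs _).mpr hlast
      simp [pvBitOf, hlast, e2, PySem.List.pyGet?_neg_one]
    · by_cases hcs : c = ' '
      · subst hcs
        have e1 : PySem.Chars.endswith l.toList [' '] = true := (hs _).mpr hlast
        simp [pvBitOf, hlast, e1, hct, PySem.List.pyGet?_neg_one]
      · have e1 : PySem.Chars.endswith l.toList [' '] = false := by
          rw [← Bool.not_eq_true, hs, hlast]
          simp [hcs]
        have e2 : PySem.Chars.endswith l.toList ['\t'] = false := by
          rw [← Bool.not_eq_true, hs, hlast]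
          simp [hct]
        simp [pvBitOf, hlast, e1, e2, hct, hcs]

-- A's first loop computes pvBits
theorem pvLemA_bits (ls : List String) : ∀ (s : Nat) (acc : List Char),
    (PySem.List.pyRange (s : Int) (ls.length : Int) 2).foldl
      (fun acc i =>
        let line := PySem.List.pyGetD ls i ""
        if PySem.Str.endswith line " " || PySem.Str.endswith line "\t" then
          acc ++ [if PySem.Str.pyGet? line (-1) = some '\t' then '1' else '0']
        else acc) acc
    = acc ++ pvBits ls s := by
  induction ls with
  | nil =>
    intro s acc
    rw [pvRange_nil _ _ _ (by norm_num) (by simp)]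
    simp [pvBits]
  | cons l rest ih =>
    intro s acc
    have hshift : ∀ a : Int, PySem.List.pyRange (a + 1) ((l :: rest).length : Int) 2
        = (PySem.List.pyRange a (rest.length : Int) 2).map (· + 1) := by
      intro a
      have : ((l :: rest).length : Int) = (rest.length : Int) + 1 := by
        simp
      rw [this, pvRange_shift]
    have hcongr : ∀ (g : List Char → Int → List Char),
        (g = fun acc i =>
          let line := PySem.List.pyGetD rest i ""
          if PySem.Str.endswith line " " || PySem.Str.endswith line "\t" then
            acc ++ [if PySem.Str.pyGet? line (-1) = some '\t' then '1' else '0']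
          else acc) →
        ∀ (st : Nat) (acc0 : List Char),
        (PySem.List.pyRange (st : Int) (rest.length : Int) 2).foldl
          (fun acc i =>
            let line := PySem.List.pyGetD (l :: rest) (i + 1) ""
            if PySem.Str.endswith line " " || PySem.Str.endswith line "\t" then
              acc ++ [if PySem.Str.pyGet? line (-1) = some '\t' then '1' else '0']
            else acc) acc0
        = acc0 ++ pvBits rest st := by
      rintro g rfl st acc0
      rw [PySem.List.foldl_congr_mem _ _
        (fun acc i =>
          let line := PySem.List.pyGetD rest i ""
          if PySem.Str.endswith line " " || PySem.Str.endswith line "\t" then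
            acc ++ [if PySem.Str.pyGet? line (-1) = some '\t' then '1' else '0']
          else acc) _ ?_]
      · exact ih st acc0
      · intro acc1 x hx
        have hx0 : 0 ≤ x := by
          have := (PySem.List.mem_pyRange_iff_of_pos (by norm_num : (0:Int) < 2) x).mp hx
          omega
        obtain ⟨k, rfl⟩ : ∃ k : Nat, x = (k : Int) := ⟨x.toNat, (Int.toNat_of_nonneg hx0).symm⟩
        have : PySem.List.pyGetD (l :: rest) ((k : Int) + 1) "" = PySem.List.pyGetD rest (k : Int) "" := by
          rw [show ((k : Int) + 1) = ((k + 1 : Nat) : Int) from by push_cast; ring]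
          rw [PySem.List.pyGetD_natCast, PySem.List.pyGetD_natCast]
          simp
        simp only [this]
    match s with
    | 0 =>
      simp only [Nat.cast_zero]
      rw [pvRange_cons 0 _ 2 (by norm_num) (by simp)]
      rw [List.foldl_cons]
      simp only [PySem.List.pyGetD_zero_cons]
      rw [pvBitA l acc]
      rw [show (0 : Int) + 2 = 1 + 1 from by norm_num, hshift 1, List.foldl_map]
      have hmain := hcongr _ rfl 1 (acc ++ pvBitOf l)
      have hfin : (acc ++ pvBitOf l) ++ pvBits rest 1 = acc ++ pvBits (l :: rest) 0 := by
        simp [pvBits]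
      exact hmain.trans hfin
    | Nat.succ t =>
      rw [show ((Nat.succ t : Nat) : Int) = (t : Int) + 1 from by push_cast; ring, hshift (t : Int),
        List.foldl_map]
      have hmain := hcongr _ rfl t acc
      have hfin : acc ++ pvBits rest t = acc ++ pvBits (l :: rest) (t + 1) := by
        simp [pvBits]
      exact hmain.trans hfin

theorem pvChunks_short : ∀ (bs : List Char) (cur n : Nat), n + bs.length < 8 →
    pvChunks cur n bs = [] := by
  intro bs
  induction bs with
  | nil => intro cur n _; rfl
  | cons c bs ih =>
    intro cur n h
    simp only [List.length_cons] at h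
    unfold pvChunks
    rw [if_neg (by omega)]
    exact ih _ _ (by omega)

theorem pvChunks_split : ∀ (pre rest : List Char) (cur n : Nat), n < 8 → n + pre.length = 8 →
    pvChunks cur n (pre ++ rest)
      = Char.ofNat (pre.foldl (fun a c => a * 2 + (if c = '1' then 1 else 0)) cur)
        :: pvChunks 0 0 rest := by
  intro pre
  induction pre with
  | nil =>
    intro rest cur n h1 h2
    simp at h2
    omega
  | cons c pre ih =>
    intro rest cur n h1 h2
    simp only [List.length_cons] at h2
    rw [List.cons_append]
    rw [show pvChunks cur n (c :: (pre ++ rest))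
        = (if n + 1 = 8 then Char.ofNat (cur * 2 + (if c = '1' then 1 else 0)) :: pvChunks 0 0 (pre ++ rest)
           else pvChunks (cur * 2 + (if c = '1' then 1 else 0)) (n + 1) (pre ++ rest)) from rfl]
    by_cases h8 : n + 1 = 8
    · have hpre : pre = [] := by
        have : pre.length = 0 := by omega
        exact List.eq_nil_of_length_eq_zero this
      subst hpre
      rw [if_pos h8]
      simp
    · rw [if_neg h8]
      rw [ih rest _ (n + 1) (by omega) (by omega)]
      simp

-- A's second loop computes pvChunks 0 0
theorem pvLemA_chunks_aux : ∀ (n : Nat) (bs : List Char), bs.length = n → ∀ acc : List Char,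
    (PySem.List.pyRange 0 (bs.length : Int) 8).foldl
      (fun acc i =>
        let byte := PySem.List.slice bs (some i) (some (i + 8))
        if byte.length = 8 then acc ++ [Char.ofNat (pvParseBin byte)] else acc) acc
    = acc ++ pvChunks 0 0 bs := by
  intro n
  induction n using Nat.strong_induction_on with
  | _ n ih =>
    intro bs hn acc
    have hslice08 : PySem.List.slice bs (some (0 : Int)) (some ((0 : Int) + 8)) = bs.take 8 := by
      rw [show ((0 : Int) + 8) = ((8 : Nat) : Int) from by norm_num,
        show (0 : Int) = ((0 : Nat) : Int) from rfl, PySem.List.slice_natCast]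
      simp
    rcases Nat.lt_or_ge bs.length 8 with h8 | h8
    · by_cases hz : bs.length = 0
      · rw [hz]
        rw [pvRange_nil _ _ _ (by norm_num) (by norm_num)]
        rw [pvChunks_short bs 0 0 (by omega)]
        simp
      · rw [pvRange_cons 0 _ 8 (by norm_num) (by omega)]
        rw [show PySem.List.pyRange (0 + 8) (bs.length : Int) 8 = [] from
          pvRange_nil _ _ _ (by norm_num) (by push_cast; omega)]
        simp only [List.foldl_cons, List.foldl_nil]
        rw [hslice08, if_neg (by simp; omega)]
        rw [pvChunks_short bs 0 0 (by omega)]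
        simp
    · rw [pvRange_cons 0 _ 8 (by norm_num) (by omega)]
      rw [show PySem.List.pyRange ((0 : Int) + 8) (bs.length : Int) 8
          = (PySem.List.pyRange 0 (((bs.drop 8).length : Nat) : Int) 8).map (· + 8) from by
        have h := pvRange_shift 0 ((bs.length : Int) - 8) 8 8
        simp only [zero_add] at h
        rw [show (bs.length : Int) - 8 + 8 = (bs.length : Int) from by ring] at h
        rw [show ((0 : Int) + 8) = 8 from by norm_num, h]
        congr 2
        simp
        omega]
      simp only [List.foldl_cons]
      rw [hslice08, if_pos (by simp [h8])]
      rw [List.foldl_map]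
      rw [PySem.List.foldl_congr_mem _ _
        (fun a i =>
          let byte := PySem.List.slice (bs.drop 8) (some i) (some (i + 8))
          if byte.length = 8 then a ++ [Char.ofNat (pvParseBin byte)] else a) _ ?_]
      · rw [ih (bs.drop 8).length (by simp; omega) (bs.drop 8) rfl]
        have hsplit : pvChunks 0 0 bs
            = Char.ofNat (pvParseBin (bs.take 8)) :: pvChunks 0 0 (bs.drop 8) := by
          conv_lhs => rw [← List.take_append_drop 8 bs]
          exact pvChunks_split (bs.take 8) (bs.drop 8) 0 0 (by omega) (by simp; omega)
        rw [hsplit]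
        simp
      · intro acc1 x hx
        have hx0 : 0 ≤ x := by
          have := (PySem.List.mem_pyRange_iff_of_pos (by norm_num : (0:Int) < 8) x).mp hx
          omega
        obtain ⟨k, rfl⟩ : ∃ k : Nat, x = (k : Int) := ⟨x.toNat, (Int.toNat_of_nonneg hx0).symm⟩
        have hsl : PySem.List.slice bs (some ((k : Int) + 8)) (some ((k : Int) + 8 + 8))
            = PySem.List.slice (bs.drop 8) (some (k : Int)) (some ((k : Int) + 8)) := by
          rw [show ((k : Int) + 8) = ((k + 8 : Nat) : Int) from by push_cast; ring,
            show ((k + 8 : Nat) : Int) + 8 = ((k + 16 : Nat) : Int) from by push_cast; ring]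
          rw [PySem.List.slice_natCast, PySem.List.slice_natCast, List.drop_drop]
          congr 1
          · omega
          · congr 1
            omega
        simp only [hsl]
  
theorem pvLemA_chunks (bs : List Char) (acc : List Char) :
    (PySem.List.pyRange 0 (bs.length : Int) 8).foldl
      (fun acc i =>
        let byte := PySem.List.slice bs (some i) (some (i + 8))
        if byte.length = 8 then acc ++ [Char.ofNat (pvParseBin byte)] else acc) acc
    = acc ++ pvChunks 0 0 bs := pvLemA_chunks_aux bs.length bs rfl acc

theorem pvAcc8_cons (out : List Char) (cur n : Nat) (c : Char) (bs : List Char) :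
    pvAcc8 (out, cur, n) (c :: bs)
      = (if n + 1 = 8 then
          pvAcc8 (out ++ [Char.ofNat (cur * 2 + (if c = '1' then 1 else 0))], 0, 0) bs
         else pvAcc8 (out, cur * 2 + (if c = '1' then 1 else 0), n + 1) bs) := rfl

theorem pvChunks_cons (cur n : Nat) (c : Char) (bs : List Char) :
    pvChunks cur n (c :: bs)
      = (if n + 1 = 8 then
          Char.ofNat (cur * 2 + (if c = '1' then 1 else 0)) :: pvChunks 0 0 bs
         else pvChunks (cur * 2 + (if c = '1' then 1 else 0)) (n + 1) bs) := rfl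

theorem pvAcc8_append (xs : List Char) : ∀ (ys : List Char) (st : List Char × Nat × Nat),
    pvAcc8 st (xs ++ ys) = pvAcc8 (pvAcc8 st xs) ys := by
  induction xs with
  | nil => intro ys st; rfl
  | cons c xs ih =>
    intro ys st
    obtain ⟨out, cur, n⟩ := st
    rw [List.cons_append, pvAcc8_cons, pvAcc8_cons]
    by_cases h8 : n + 1 = 8
    · rw [if_pos h8, if_pos h8, ih]
    · rw [if_neg h8, if_neg h8, ih]

theorem pvAcc8_out : ∀ (bs : List Char) (out : List Char) (cur n : Nat),
    (pvAcc8 (out, cur, n) bs).1 = out ++ pvChunks cur n bs := by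
  intro bs
  induction bs with
  | nil => intro out cur n; simp [pvAcc8, pvChunks]
  | cons c bs ih =>
    intro out cur n
    rw [pvAcc8_cons, pvChunks_cons]
    by_cases h8 : n + 1 = 8
    · rw [if_pos h8, if_pos h8, ih]
      simp
    · rw [if_neg h8, if_neg h8, ih]

-- B's line fold is pvAcc8 over the bit stream
theorem pvLemB (ls : List String) : ∀ (out : List Char) (cur n : Nat) (odd : Bool),
    ∃ b : Bool, List.foldl pvStepLine (out, cur, n, odd) ls
      = ((pvAcc8 (out, cur, n) (pvBits ls (cond odd 0 1))).1,
         (pvAcc8 (out, cur, n) (pvBits ls (cond odd 0 1))).2.1,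
         (pvAcc8 (out, cur, n) (pvBits ls (cond odd 0 1))).2.2, b) := by
  induction ls with
  | nil => intro out cur n odd; exact ⟨odd, by cases odd <;> simp [pvBits, pvAcc8]⟩
  | cons l rest ih =>
    intro out cur n odd
    cases odd with
    | false =>
      rw [List.foldl_cons, show pvStepLine (out, cur, n, false) l = (out, cur, n, true) from rfl]
      simpa [pvBits] using ih out cur n true
    | true =>
      rw [List.foldl_cons]
      have hbits : pvBits (l :: rest) (cond true 0 1) = pvBitOf l ++ pvBits rest 1 := rfl
      rw [hbits, pvAcc8_append]
      have hstep : pvStepLine (out, cur, n, true) l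
          = ((pvAcc8 (out, cur, n) (pvBitOf l)).1, (pvAcc8 (out, cur, n) (pvBitOf l)).2.1,
             (pvAcc8 (out, cur, n) (pvBitOf l)).2.2, false) := by
        cases hlast : l.toList.getLast? with
        | none => simp [pvStepLine, pvBitOf, hlast, pvAcc8]
        | some c =>
          by_cases hct : c = '\t'
          · subst hct
            by_cases h8 : n + 1 = 8 <;>
              simp [pvStepLine, pvBitOf, hlast, pvAcc8_cons, pvAcc8, h8]
          · by_cases hcs : c = ' '
            · subst hcs
              by_cases h8 : n + 1 = 8 <;>
                simp [pvStepLine, pvBitOf, hlast, pvAcc8_cons, pvAcc8, h8]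
            · simp [pvStepLine, pvBitOf, hlast, hct, hcs, pvAcc8]
      rw [hstep]
      obtain ⟨b, hb⟩ := ih (pvAcc8 (out, cur, n) (pvBitOf l)).1
        (pvAcc8 (out, cur, n) (pvBitOf l)).2.1 (pvAcc8 (out, cur, n) (pvBitOf l)).2.2 false
      refine ⟨b, ?_⟩
      simpa using hb

-- ===== VERDICT (by name: the statement is the Claim_ definition above) =====
theorem extract_watermark_spec : Claim_equal_extract_watermark := by
  intro code _
  show extract_watermark code = extract_watermark_alt code
  unfold extract_watermark extract_watermark_alt
  simp only []
  set lines := PySem.Str.splitlines code with hlines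
  obtain ⟨b, hb⟩ := pvLemB lines [] 0 0 false
  have hA1 := pvLemA_bits lines 1 []
  have hpat : (PySem.List.pyRange 1 (lines.length : Int) 2).foldl
      (fun acc i =>
        let line := PySem.List.pyGetD lines i ""
        if PySem.Str.endswith line " " || PySem.Str.endswith line "\t" then
          acc ++ [if PySem.Str.pyGet? line (-1) = some '\t' then '1' else '0']
        else acc) ([] : List Char) = pvBits lines 1 := by
    simpa using hA1
  rw [hpat, pvLemA_chunks (pvBits lines 1) [], hb]
  simp only []
  rw [pvAcc8_out]
  simp
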